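-- pv_equiv track=rewrite | github.com/r-xue/pipeline | pipeline/hsd/tasks/importdata/rasterutil.py | gap_gen
-- ===== SOURCE A (Python) =====
-- def gap_gen(gaplist, length=None):
--     """
--     Generate range of data (start and end indices) from
--     given gap list. Return values, s and e, can be used to
--     arr[s:e] to extract the data from the original array, arr.
--
--     :param gaplist: list of indices indicating gap
--     :type gaplist: list
--     :param length: total number of data, defaults to None
--     :type length: int, optional
--     :yield: start and end indices
--     :rtype: two tuple of integers
--     """
--     n = -1 if length is None else length
--     if len(gaplist) == 0:
--         yield 0, n
--     else:
--         yield 0, gaplist[0] + 1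
--         for i, j in zip(gaplist[:-1], gaplist[1:]):
--             yield i + 1, j + 1
--         yield gaplist[-1] + 1, n
-- ===== SOURCE B (Python) =====
-- def gap_gen(gaplist, length=None):
--     """Build the ranges back-to-front: walk the gap list in reverse carrying
--     the end of the next range, then emit the collected ranges in order."""
--     n = -1 if length is None else length
--     out = []
--     end = n
--     for g in reversed(gaplist):
--         out.append((g + 1, end))
--         end = g + 1
--     out.append((0, end))
--     yield from reversed(out)
-- ===== Notes on version B (the rewrite author's own statement) =====
-- stated objective: alternative
-- what changed: B builds the ranges back-to-front: it walks the gap list in reverse carrying the end of the next range as an accumulator and finally emits the collected ranges reversed, instead of A's forward pass with an empty-list branch, a zip of the two slices gaplist[:-1]/gaplist[1:], and three separate yield sites.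
import Mathlib
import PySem

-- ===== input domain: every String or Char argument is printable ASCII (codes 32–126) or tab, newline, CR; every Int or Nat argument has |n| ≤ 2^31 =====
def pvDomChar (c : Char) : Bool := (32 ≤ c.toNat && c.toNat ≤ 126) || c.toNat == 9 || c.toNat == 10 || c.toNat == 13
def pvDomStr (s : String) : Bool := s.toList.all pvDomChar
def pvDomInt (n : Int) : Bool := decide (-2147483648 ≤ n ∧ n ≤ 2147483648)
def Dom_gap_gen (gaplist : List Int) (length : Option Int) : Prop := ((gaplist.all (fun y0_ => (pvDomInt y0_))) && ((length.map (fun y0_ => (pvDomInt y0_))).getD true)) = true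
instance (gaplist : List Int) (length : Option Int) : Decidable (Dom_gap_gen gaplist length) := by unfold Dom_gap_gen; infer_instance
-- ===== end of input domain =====

-- B builds the ranges back-to-front (reverse walk carrying the next range's end, then emit
-- reversed) instead of A's forward empty-branch + zip-of-slices + three yield sites
-- (objective: alternative decomposition).


-- ===== PORT A =====
-- literal port of A: empty branch, first yield, middle zip(gaplist[:-1], gaplist[1:]), last yield
def gap_gen (gaplist : List Int) (length : Option Int) : List (Int × Int) :=
  let n : Int := match length with | none => -1 | some l => l
  match gaplist with
  | [] => [(0, n)]
  | g :: rest =>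
      (0, g + 1) ::
        (((g :: rest).dropLast.zip rest).map (fun p => (p.1 + 1, p.2 + 1)) ++
          [((g :: rest).getLast (by simp) + 1, n)])

-- ===== PORT B =====
-- literal port of B: fold over reversed(gaplist) appending (g+1, end) and updating end,
-- then append the final (0, end) and reverse the collected list
def gap_gen_alt (gaplist : List Int) (length : Option Int) : List (Int × Int) :=
  let n : Int := match length with | none => -1 | some l => l
  let st := gaplist.reverse.foldl
    (fun (st : List (Int × Int) × Int) g => (st.1 ++ [(g + 1, st.2)], g + 1)) ([], n)
  (st.1 ++ [(0, st.2)]).reverse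

-- ===== PRECONDITION & SPEC =====
def Spec_gap_gen (gaplist : List Int) (length : Option Int) (out : List (Int × Int)) : Prop := out = gap_gen_alt gaplist length
instance (gaplist : List Int) (length : Option Int) (out : List (Int × Int)) : Decidable (Spec_gap_gen gaplist length out) := by unfold Spec_gap_gen; infer_instance

-- ===== CLAIM (what is proved, stated in full; the proofs are below) =====
def Claim_equal_gap_gen : Prop := ∀ (gaplist : List Int) (length : Option Int), Dom_gap_gen gaplist length → Spec_gap_gen gaplist length (gap_gen gaplist length)

-- ===== LEMMAS AND PROOFS =====

-- common characterisation: the chain of consecutive ranges starting at a, ending at n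
def pvChain (a : Int) (gl : List Int) (n : Int) : List (Int × Int) :=
  match gl with
  | [] => [(a, n)]
  | g :: rest => (a, g + 1) :: pvChain (g + 1) rest n

-- A's zip-of-slices tail equals the chain started after the first gap
theorem pvChain_eq_A : ∀ (rest : List Int) (g n : Int),
    ((g :: rest).dropLast.zip rest).map (fun p => (p.1 + 1, p.2 + 1)) ++
      [((g :: rest).getLast (by simp) + 1, n)] = pvChain (g + 1) rest n := by
  intro rest
  induction rest with
  | nil => intro g n; simp [pvChain]
  | cons j rest' ih =>
      intro g n
      simp only [List.dropLast, List.zip, List.zipWith, List.map, List.cons_append, pvChain]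
      exact congrArg _ (ih j n)

-- B's backward fold (as a foldr after List.foldl_reverse) produces the chain:
-- prefixing any start a to the folded state yields pvChain a gl n
theorem pvFold_chain : ∀ (gl : List Int) (n a : Int),
    (a, (gl.foldr (fun g st => (st.1 ++ [(g + 1, st.2)], g + 1))
        (([] : List (Int × Int)), n)).2) ::
      (gl.foldr (fun g st => (st.1 ++ [(g + 1, st.2)], g + 1))
        (([] : List (Int × Int)), n)).1.reverse = pvChain a gl n := by
  intro gl
  induction gl with
  | nil => intro n a; simp [pvChain]
  | cons g rest ih =>
      intro n a
      simp only [List.foldr, pvChain, List.reverse_append, List.reverse_cons,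
        List.reverse_nil, List.nil_append, List.cons_append]
      exact congrArg _ (ih n (g + 1))

-- ===== VERDICT (by name: the statement is the Claim_ definition above) =====
theorem gap_gen_spec : Claim_equal_gap_gen := by
  intro gaplist length _
  show gap_gen gaplist length = gap_gen_alt gaplist length
  unfold gap_gen gap_gen_alt
  cases length <;> dsimp only <;> rw [List.foldl_reverse] <;>
    cases gaplist with
    | nil => simp
    | cons g rest =>
        rw [show ∀ (xs : List (Int × Int)) (p : Int × Int), (xs ++ [p]).reverse = p :: xs.reverse
              from fun xs p => by simp]
        rw [pvFold_chain (g :: rest) _ 0]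
        simp only [pvChain]
        exact congrArg _ (pvChain_eq_A rest g _)
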